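-- pv_equiv track=rewrite | github.com/maya-sb/RelogioCorrida | geral.py | dividirLap
-- ===== SOURCE A (Python) =====
-- def dividirLap(linhas_arq):
--     timestamp_inicial, timestamp_final = linhas_arq[0].split()
--     lista_todos_laps = []
--     lista_lap = []
--     registro = False
--     cont = 0
--     lista_lap.append("l {}\n".format(str(timestamp_inicial)))
--     for linha in linhas_arq[3:]:
--         if linha[0] == "r":
--             registro = True
--         if linha[0] == "#":
--             registro = False
--         if linha[0] == "l" and registro == False:
--             if cont!=0:
--                 lap = linha
--                 lista_lap.append(lap)
--                 lista_todos_laps.append(lista_lap)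
--                 lista_lap = []
--         lista_lap.append(linha)
--         cont += 1
--     lista_lap.append("l {}\n".format(str(timestamp_final)))
--     lista_todos_laps.append(lista_lap)
--     return lista_todos_laps
-- ===== SOURCE B (Python) =====
-- def dividirLap(linhas_arq):
--     timestamp_inicial, timestamp_final = linhas_arq[0].split()
--     corpo = linhas_arq[3:]
--     # pass 1: indices of lap-boundary lines (an 'l' line seen while not recording, except index 0)
--     bounds = []
--     registro = False
--     for i, linha in enumerate(corpo):
--         c = linha[0]
--         if c == "r":
--             registro = True
--         elif c == "#":
--             registro = False
--         elif c == "l" and not registro and i != 0: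
--             bounds.append(i)
--     # pass 2: slice laps; each boundary line is shared by both neighbouring laps
--     laps = []
--     prev = 0
--     for b in bounds:
--         laps.append(corpo[prev:b + 1])
--         prev = b
--     laps.append(corpo[prev:])
--     laps[0] = ["l {}\n".format(timestamp_inicial)] + laps[0]
--     laps[-1] = laps[-1] + ["l {}\n".format(timestamp_final)]
--     return laps
-- ===== Notes on version B (the rewrite author's own statement) =====
-- stated objective: alternative
-- what changed: Replaces A's single stateful loop that grows and flushes a current-lap accumulator with a two-pass scheme: first record the boundary indices of lap lines, then build each lap by slicing corpo between consecutive boundaries (inclusive on both ends) and attach the header/footer lines afterwards.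
import Mathlib
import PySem

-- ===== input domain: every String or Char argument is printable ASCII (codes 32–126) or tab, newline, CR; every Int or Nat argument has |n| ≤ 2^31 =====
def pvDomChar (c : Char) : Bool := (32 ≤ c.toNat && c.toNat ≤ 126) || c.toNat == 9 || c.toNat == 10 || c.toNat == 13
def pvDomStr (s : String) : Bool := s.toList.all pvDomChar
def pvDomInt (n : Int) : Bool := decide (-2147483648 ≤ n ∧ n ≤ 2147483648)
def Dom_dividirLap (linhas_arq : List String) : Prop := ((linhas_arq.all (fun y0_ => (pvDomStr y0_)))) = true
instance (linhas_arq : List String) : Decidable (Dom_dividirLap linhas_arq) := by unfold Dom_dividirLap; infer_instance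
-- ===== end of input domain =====

-- B regroups the laps with a two-pass boundary-index-and-slice scheme instead of A's single
-- stateful accumulator loop; objective: alternative (same O(n) cost). Return values only.

-- ===== PORT A =====
-- "l {}\n".format(ts)
def lapLineA (ts : String) : String := "l " ++ ts ++ "\n"

-- one iteration of A's for-loop; state = (lista_todos_laps, lista_lap, registro, cont)
def stepA (st : List (List String) × List String × Bool × Int) (linha : String) :
    List (List String) × List String × Bool × Int :=
  match st with
  | (acc, cur, reg, cont) =>
    let c := PySem.Str.pyGet? linha 0        -- linha[0]; none = IndexError, excluded by Pre_
    let reg := if c = some 'r' then true else reg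
    let reg := if c = some '#' then false else reg
    if c = some 'l' ∧ reg = false ∧ cont ≠ 0 then
      (acc ++ [cur ++ [linha]], [linha], reg, cont + 1)
    else
      (acc, cur ++ [linha], reg, cont + 1)

def dividirLap (linhas_arq : List String) : List (List String) :=
  match PySem.List.pyGet? linhas_arq 0 with
  | none => []                               -- IndexError, excluded by Pre_
  | some first =>
    match PySem.Str.split₀ first with        -- 2-tuple unpack; other arities = ValueError, excluded by Pre_
    | [ts_ini, ts_fim] =>
      let st := (PySem.List.slice linhas_arq (some 3) none).foldl stepA
                  ([], [lapLineA ts_ini], false, 0)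
      st.1 ++ [st.2.1 ++ [lapLineA ts_fim]]
    | _ => []

-- ===== PORT B =====

-- pass 1 body: collect boundary indices; state = (bounds, registro)
def stepB (st : List Int × Bool) (p : Int × String) : List Int × Bool :=
  let c := PySem.Str.pyGet? p.2 0            -- linha[0]; none = IndexError, excluded by Pre_
  if c = some 'r' then (st.1, true)
  else if c = some '#' then (st.1, false)
  else if c = some 'l' ∧ st.2 = false ∧ p.1 ≠ 0 then (st.1 ++ [p.1], st.2)
  else st

-- pass 2: for b in bounds: laps.append(corpo[prev:b+1]); prev = b; then laps.append(corpo[prev:])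
def mkLaps (corpo : List String) (prev : Int) : List Int → List (List String)
  | [] => [PySem.List.slice corpo (some prev) none]
  | b :: rest => PySem.List.slice corpo (some prev) (some (b + 1)) :: mkLaps corpo b rest

-- laps[0] = [hdr] + laps[0]
def consHead (v : String) : List (List String) → List (List String)
  | [] => []
  | h :: t => (v :: h) :: t

-- laps[-1] = f(laps[-1])
def setLast (f : List String → List String) : List (List String) → List (List String)
  | [] => []
  | h :: t =>
    match t with
    | [] => [f h]
    | h2 :: t2 => h :: setLast f (h2 :: t2)

def dividirLap_alt (linhas_arq : List String) : List (List String) :=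
  (PySem.List.pyGet? linhas_arq 0).elim []                 -- linhas_arq[0]; none = IndexError, excluded by Pre_
    (fun first =>
      let toks := PySem.Str.split₀ first
      if toks.length = 2 then                              -- 2-tuple unpack, as in A; else ValueError
        let ts_ini := toks.getD 0 ""
        let ts_fim := toks.getD 1 ""
        let corpo := PySem.List.slice linhas_arq (some 3) none
        let bs := (PySem.List.enumerate corpo 0).foldl stepB ([], false)
        setLast (· ++ ["l " ++ ts_fim ++ "\n"]) (consHead ("l " ++ ts_ini ++ "\n") (mkLaps corpo 0 bs.1))
      else [])

-- ===== PRECONDITION & SPEC =====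
-- Pre_ excludes exactly the inputs where Python A raises: an empty list (IndexError on
-- linhas_arq[0]), a first line not splitting into exactly two words (ValueError on unpacking),
-- and an empty line among linhas_arq[3:] (IndexError on linha[0]). B raises there too.
def Pre_dividirLap (linhas_arq : List String) : Prop :=
  linhas_arq ≠ [] ∧ (PySem.Str.split₀ linhas_arq.headI).length = 2 ∧
    ∀ s ∈ linhas_arq.drop 3, s ≠ ""
instance (linhas_arq : List String) : Decidable (Pre_dividirLap linhas_arq) := by
  unfold Pre_dividirLap; infer_instance
def pvWitness_dividirLap : List String := ["10 99", "x", "y", "z 0", "l 1\n", "r a", "# b", "l 2\n"]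

def Spec_dividirLap (linhas_arq : List String) (out : List (List String)) : Prop := out = dividirLap_alt linhas_arq
instance (linhas_arq : List String) (out : List (List String)) : Decidable (Spec_dividirLap linhas_arq out) := by unfold Spec_dividirLap; infer_instance

-- ===== CLAIM (what is proved, stated in full; the proofs are below) =====
def Claim_equal_dividirLap : Prop := ∀ (linhas_arq : List String), Dom_dividirLap linhas_arq → Pre_dividirLap linhas_arq → Spec_dividirLap linhas_arq (dividirLap linhas_arq)

-- ===== LEMMAS AND PROOFS =====

theorem setLast_ne_nil (f : List String → List String) (L : List (List String)) (h : L ≠ []) :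
    setLast f L ≠ [] := by
  cases L with
  | nil => exact absurd rfl h
  | cons a t => cases t <;> simp [setLast]

theorem setLast_append_singleton (f : List String → List String)
    (a : List (List String)) (c : List String) :
    setLast f (a ++ [c]) = a ++ [f c] := by
  induction a with
  | nil => rfl
  | cons h t ih =>
    cases t with
    | nil => simp [setLast]
    | cons h2 t2 => simpa [setLast] using ih

theorem mkLaps_ne_nil (corpo : List String) (prev : Int) (bs : List Int) :
    mkLaps corpo prev bs ≠ [] := by
  cases bs <;> simp [mkLaps]

theorem consHead_append_singleton (v : String) (L : List (List String)) (c : List String)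
    (hL : L ≠ []) : consHead v (L ++ [c]) = consHead v L ++ [c] := by
  cases L with
  | nil => exact absurd rfl hL
  | cons h t => simp [consHead]

theorem consHead_setLast_comm (v x : String) (L : List (List String)) :
    consHead v (setLast (· ++ [x]) L) = setLast (· ++ [x]) (consHead v L) := by
  cases L with
  | nil => rfl
  | cons h t =>
    cases t with
    | nil => simp [consHead, setLast]
    | cons h2 t2 => simp [consHead, setLast]

-- appending one more line to corpo extends the final lap of the slicing scheme
theorem mkLaps_snoc (ys : List String) (x : String) (prev : Int) (bs : List Int)
    (hp0 : 0 ≤ prev) (hpl : prev ≤ (ys.length : Int))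
    (hb : ∀ b ∈ bs, 0 ≤ b ∧ b + 1 ≤ (ys.length : Int)) :
    mkLaps (ys ++ [x]) prev bs = setLast (· ++ [x]) (mkLaps ys prev bs) := by
  induction bs generalizing prev with
  | nil =>
    simp [mkLaps, setLast, PySem.List.slice_from _ hp0,
      List.drop_append_of_le_length (by omega : prev.toNat ≤ ys.length)]
  | cons b rest ih =>
    have hbb := hb b (by simp)
    have h1 : PySem.List.slice (ys ++ [x]) (some prev) (some (b + 1))
        = PySem.List.slice ys (some prev) (some (b + 1)) := by
      rw [PySem.List.slice_toNat _ hp0 (by omega), PySem.List.slice_toNat _ hp0 (by omega),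
        List.drop_append_of_le_length (by omega : prev.toNat ≤ ys.length),
        List.take_append_of_le_length (by simp; omega)]
    have hrest := ih b hbb.1 (by omega) (fun c hc => hb c (by simp [hc]))
    cases hres : mkLaps ys b rest with
    | nil => exact absurd hres (mkLaps_ne_nil ys b rest)
    | cons h t =>
      simp [mkLaps, h1, hrest, hres, setLast]

-- a new boundary at index (length ys) closes the current lap and opens one holding x alone
theorem mkLaps_snoc_boundary (ys : List String) (x : String) (prev : Int) (bs : List Int)
    (hp0 : 0 ≤ prev) (hpl : prev ≤ (ys.length : Int))
    (hb : ∀ b ∈ bs, 0 ≤ b ∧ b + 1 ≤ (ys.length : Int)) :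
    mkLaps (ys ++ [x]) prev (bs ++ [(ys.length : Int)])
      = setLast (· ++ [x]) (mkLaps ys prev bs) ++ [[x]] := by
  induction bs generalizing prev with
  | nil =>
    have h1 : PySem.List.slice (ys ++ [x]) (some prev) (some ((ys.length : Int) + 1))
        = ys.drop prev.toNat ++ [x] := by
      rw [PySem.List.slice_toNat _ hp0 (by omega),
        List.drop_append_of_le_length (by omega : prev.toNat ≤ ys.length)]
      apply List.take_of_length_le
      simp; omega
    have h2 : PySem.List.slice (ys ++ [x]) (some (ys.length : Int)) none = [x] := by
      rw [PySem.List.slice_from _ (by omega)]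
      simp
    simp [mkLaps, setLast, h1, h2, PySem.List.slice_from _ hp0]
  | cons b rest ih =>
    have hbb := hb b (by simp)
    have h1 : PySem.List.slice (ys ++ [x]) (some prev) (some (b + 1))
        = PySem.List.slice ys (some prev) (some (b + 1)) := by
      rw [PySem.List.slice_toNat _ hp0 (by omega), PySem.List.slice_toNat _ hp0 (by omega),
        List.drop_append_of_le_length (by omega : prev.toNat ≤ ys.length),
        List.take_append_of_le_length (by simp; omega)]
    have hrest := ih b hbb.1 (by omega) (fun c hc => hb c (by simp [hc]))
    cases hres : mkLaps ys b rest with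
    | nil => exact absurd hres (mkLaps_ne_nil ys b rest)
    | cons h t =>
      simp [mkLaps, h1, hrest, hres, setLast]

-- a non-boundary line only extends the current (= last) lap
theorem nonboundary_acc (init0 x : String) (accA : List (List String)) (curA : List String)
    (ys : List String) (bsB : List Int)
    (hbnd : ∀ b ∈ bsB, 0 ≤ b ∧ b + 1 ≤ (ys.length : Int))
    (hacc : accA ++ [curA] = consHead init0 (mkLaps ys 0 bsB)) :
    accA ++ [curA ++ [x]] = consHead init0 (mkLaps (ys ++ [x]) 0 bsB) := by
  rw [mkLaps_snoc ys x 0 bsB le_rfl (Int.natCast_nonneg _) hbnd, consHead_setLast_comm, ← hacc,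
    setLast_append_singleton]

-- a boundary line closes the current lap and opens a new one holding it alone
theorem boundary_acc (init0 x : String) (accA : List (List String)) (curA : List String)
    (ys : List String) (bsB : List Int)
    (hbnd : ∀ b ∈ bsB, 0 ≤ b ∧ b + 1 ≤ (ys.length : Int))
    (hacc : accA ++ [curA] = consHead init0 (mkLaps ys 0 bsB)) :
    accA ++ [curA ++ [x]] ++ [[x]]
      = consHead init0 (mkLaps (ys ++ [x]) 0 (bsB ++ [(ys.length : Int)])) := by
  rw [mkLaps_snoc_boundary ys x 0 bsB le_rfl (Int.natCast_nonneg _) hbnd,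
    consHead_append_singleton _ _ _ (setLast_ne_nil _ _ (mkLaps_ne_nil ys 0 bsB)),
    consHead_setLast_comm, ← hacc, setLast_append_singleton]

-- step computations, one per character case
theorem stepA_r (acc : List (List String)) (cur : List String) (reg : Bool) (cont : Int)
    (x : String) (h : PySem.List.pyGet? x.toList 0 = some 'r') :
    stepA (acc, cur, reg, cont) x = (acc, cur ++ [x], true, cont + 1) := by
  simp [stepA, h]

theorem stepA_hash (acc : List (List String)) (cur : List String) (reg : Bool) (cont : Int)
    (x : String) (h : PySem.List.pyGet? x.toList 0 = some '#') :
    stepA (acc, cur, reg, cont) x = (acc, cur ++ [x], false, cont + 1) := by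
  simp [stepA, h]

theorem stepA_l_true (acc : List (List String)) (cur : List String) (cont : Int)
    (x : String) (h : PySem.List.pyGet? x.toList 0 = some 'l') :
    stepA (acc, cur, true, cont) x = (acc, cur ++ [x], true, cont + 1) := by
  simp [stepA, h]

theorem stepA_l_zero (acc : List (List String)) (cur : List String)
    (x : String) (h : PySem.List.pyGet? x.toList 0 = some 'l') :
    stepA (acc, cur, false, 0) x = (acc, cur ++ [x], false, 1) := by
  simp [stepA, h]

theorem stepA_l_bnd (acc : List (List String)) (cur : List String) (cont : Int)
    (x : String) (h : PySem.List.pyGet? x.toList 0 = some 'l') (hc : cont ≠ 0) :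
    stepA (acc, cur, false, cont) x = (acc ++ [cur ++ [x]], [x], false, cont + 1) := by
  simp [stepA, h, hc]

theorem stepA_other (acc : List (List String)) (cur : List String) (reg : Bool) (cont : Int)
    (x : String) (hr : ¬ PySem.List.pyGet? x.toList 0 = some 'r')
    (hh : ¬ PySem.List.pyGet? x.toList 0 = some '#') (hl : ¬ PySem.List.pyGet? x.toList 0 = some 'l') :
    stepA (acc, cur, reg, cont) x = (acc, cur ++ [x], reg, cont + 1) := by
  simp [stepA, hr, hh, hl]

theorem stepB_r (bs : List Int) (reg : Bool) (i : Int) (x : String)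
    (h : PySem.List.pyGet? x.toList 0 = some 'r') : stepB (bs, reg) (i, x) = (bs, true) := by
  simp [stepB, h]

theorem stepB_hash (bs : List Int) (reg : Bool) (i : Int) (x : String)
    (h : PySem.List.pyGet? x.toList 0 = some '#') : stepB (bs, reg) (i, x) = (bs, false) := by
  simp [stepB, h]

theorem stepB_l_true (bs : List Int) (i : Int) (x : String)
    (h : PySem.List.pyGet? x.toList 0 = some 'l') : stepB (bs, true) (i, x) = (bs, true) := by
  simp [stepB, h]

theorem stepB_l_zero (bs : List Int) (x : String)
    (h : PySem.List.pyGet? x.toList 0 = some 'l') : stepB (bs, false) (0, x) = (bs, false) := by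
  simp [stepB, h]

theorem stepB_l_bnd (bs : List Int) (i : Int) (x : String)
    (h : PySem.List.pyGet? x.toList 0 = some 'l') (hi : i ≠ 0) :
    stepB (bs, false) (i, x) = (bs ++ [i], false) := by
  simp [stepB, h, hi]

theorem stepB_other (bs : List Int) (reg : Bool) (i : Int) (x : String)
    (hr : ¬ PySem.List.pyGet? x.toList 0 = some 'r') (hh : ¬ PySem.List.pyGet? x.toList 0 = some '#')
    (hl : ¬ PySem.List.pyGet? x.toList 0 = some 'l') : stepB (bs, reg) (i, x) = (bs, reg) := by
  simp [stepB, hr, hh, hl]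

-- the loop invariant tying A's accumulator state to B's boundary list
theorem main_inv (init0 : String) (corpo : List String) :
    (corpo.foldl stepA ([], [init0], false, 0)).2.2.1
        = ((PySem.List.enumerate corpo 0).foldl stepB ([], false)).2
    ∧ (corpo.foldl stepA ([], [init0], false, 0)).2.2.2 = (corpo.length : Int)
    ∧ (∀ b ∈ ((PySem.List.enumerate corpo 0).foldl stepB ([], false)).1,
          0 ≤ b ∧ b + 1 ≤ (corpo.length : Int))
    ∧ (corpo.foldl stepA ([], [init0], false, 0)).1
        ++ [(corpo.foldl stepA ([], [init0], false, 0)).2.1]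
        = consHead init0 (mkLaps corpo 0
            ((PySem.List.enumerate corpo 0).foldl stepB ([], false)).1) := by
  induction corpo using List.reverseRecOn with
  | nil =>
    refine ⟨rfl, rfl, by simp [PySem.List.enumerate], ?_⟩
    simp [mkLaps, consHead, PySem.List.slice_from]
  | append_singleton ys x ih =>
    rw [List.foldl_append, PySem.List.enumerate_append, List.foldl_append]
    rcases hA : ys.foldl stepA ([], [init0], false, 0) with ⟨accA, curA, regA, contA⟩
    rcases hB : (PySem.List.enumerate ys 0).foldl stepB ([], false) with ⟨bsB, regB⟩
    rw [hA, hB] at ih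
    obtain ⟨hreg, hcont, hbnd, hacc⟩ := ih
    simp only at hreg hcont hbnd hacc
    subst hreg hcont
    simp only [PySem.List.enumerate_cons, PySem.List.enumerate_nil, List.foldl_cons,
      List.foldl_nil, zero_add, List.length_append, List.length_cons, List.length_nil]
    have hB1 : ∀ b ∈ bsB, 0 ≤ b ∧ b + 1 ≤ ((ys.length + 1 : Nat) : Int) :=
      fun b hb => ⟨(hbnd b hb).1, by have := (hbnd b hb).2; push_cast at *; omega⟩
    have hNB := nonboundary_acc init0 x accA curA ys bsB hbnd hacc
    have hcnt : (ys.length : Int) + 1 = ((ys.length + 1 : Nat) : Int) := by push_cast; ring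
    by_cases hr : PySem.List.pyGet? x.toList 0 = some 'r'
    · rw [stepA_r _ _ _ _ _ hr, stepB_r _ _ _ _ hr]
      exact ⟨rfl, hcnt, hB1, hNB⟩
    · by_cases hh : PySem.List.pyGet? x.toList 0 = some '#'
      · rw [stepA_hash _ _ _ _ _ hh, stepB_hash _ _ _ _ hh]
        exact ⟨rfl, hcnt, hB1, hNB⟩
      · by_cases hl : PySem.List.pyGet? x.toList 0 = some 'l'
        · cases regA with
          | true =>
            rw [stepA_l_true _ _ _ _ hl, stepB_l_true _ _ _ hl]
            exact ⟨rfl, hcnt, hB1, hNB⟩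
          | false =>
            by_cases hn : (ys.length : Int) = 0
            · rw [hn, stepA_l_zero _ _ _ hl, stepB_l_zero _ _ hl]
              exact ⟨rfl, by show (1 : Int) = ((ys.length + 1 : Nat) : Int); omega, hB1, hNB⟩
            · rw [stepA_l_bnd _ _ _ _ hl hn, stepB_l_bnd _ _ _ hl hn]
              refine ⟨rfl, hcnt, ?_, boundary_acc init0 x accA curA ys bsB hbnd hacc⟩
              intro b hb
              rcases List.mem_append.mp hb with h | h
              · exact hB1 b h
              · simp only [List.mem_singleton] at h
                subst h
                exact ⟨Int.natCast_nonneg _, by push_cast; omega⟩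
        · rw [stepA_other _ _ _ _ _ hr hh hl, stepB_other _ _ _ _ hr hh hl]
          exact ⟨rfl, hcnt, hB1, hNB⟩

-- the two ports agree on every input (the excluded ones only matter for Python fidelity)
theorem dividir_eq (linhas_arq : List String) :
    dividirLap linhas_arq = dividirLap_alt linhas_arq := by
  rcases hg : PySem.List.pyGet? linhas_arq 0 with _ | first
  · unfold dividirLap dividirLap_alt
    rw [hg]
    rfl
  · rcases h2 : PySem.Str.split₀ first with _ | ⟨a, _ | ⟨b, _ | ⟨c, t3⟩⟩⟩ <;>
      unfold dividirLap dividirLap_alt <;> rw [hg] <;> simp [Option.elim, h2]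
    have h4 := (main_inv (lapLineA a) (PySem.List.slice linhas_arq (some 3) none)).2.2.2
    rw [show ("l " ++ a ++ "\n") = lapLineA a from rfl, show ("l " ++ b ++ "\n") = lapLineA b from rfl, ← h4, setLast_append_singleton]

-- ===== VERDICT (by name: the statement is the Claim_ definition above) =====
theorem dividirLap_spec : Claim_equal_dividirLap := by
  intro linhas_arq _ _
  show dividirLap linhas_arq = dividirLap_alt linhas_arq
  exact dividir_eq linhas_arq
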